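-- pv_equiv track=rewrite | github.com/JamesKim2998/imma-term-project | report/Problem3.py | calculate_freq_and_rank_of_words
-- ===== SOURCE A (Python) =====
-- def calculate_freq_and_rank_of_words(word_rank_list: list, word_count_dict: dict) -> (list, list):
--     freq_list = []
--     rank_list = []
--
--     rank = 1 # 현재 rank 값.
--     for i in range(len(word_count_dict)):
--         word = word_rank_list[i]
--         freq = word_count_dict[word]
--         # freq가 같은 경우 rank도 같아야 하지만 현재 word_rank_list의 index는 1씩 증가하며 모두 다른 값을 가지므로
--         # 바로 rank = i + 1을 적용할 수 없음
--         # 만약 이전 rank의 단어가 현재 단어와 동일한 freq를 같는다면, 이전 rank를 그대로 유지한다.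
--         if i > 0 and freq_list[i - 1] == freq:
--             pass
--         else:
--             rank = i + 1
--
--         freq_list.append(freq)
--         rank_list.append(rank)
--
--     return (freq_list, rank_list)
-- ===== SOURCE B (Python) =====
-- def calculate_freq_and_rank_of_words(word_rank_list: list, word_count_dict: dict) -> (list, list):
--     n = len(word_count_dict)
--     freq_list = [word_count_dict[word_rank_list[i]] for i in range(n)]
--     rank_list = []
--     start = 0
--     while start < n:
--         end = start + 1
--         while end < n and freq_list[end] == freq_list[start]:
--             end += 1
--         rank_list.extend([start + 1] * (end - start))
--         start = end
--     return (freq_list, rank_list)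
-- ===== Notes on version B (the rewrite author's own statement) =====
-- stated objective: alternative
-- what changed: Replaces the single element-wise loop that carries a running rank and looks back at the previous freq with a two-phase computation: freq_list built once by a comprehension, then ranks assigned per run of consecutive equal frequencies (each run gets its start index + 1).
import Mathlib
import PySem

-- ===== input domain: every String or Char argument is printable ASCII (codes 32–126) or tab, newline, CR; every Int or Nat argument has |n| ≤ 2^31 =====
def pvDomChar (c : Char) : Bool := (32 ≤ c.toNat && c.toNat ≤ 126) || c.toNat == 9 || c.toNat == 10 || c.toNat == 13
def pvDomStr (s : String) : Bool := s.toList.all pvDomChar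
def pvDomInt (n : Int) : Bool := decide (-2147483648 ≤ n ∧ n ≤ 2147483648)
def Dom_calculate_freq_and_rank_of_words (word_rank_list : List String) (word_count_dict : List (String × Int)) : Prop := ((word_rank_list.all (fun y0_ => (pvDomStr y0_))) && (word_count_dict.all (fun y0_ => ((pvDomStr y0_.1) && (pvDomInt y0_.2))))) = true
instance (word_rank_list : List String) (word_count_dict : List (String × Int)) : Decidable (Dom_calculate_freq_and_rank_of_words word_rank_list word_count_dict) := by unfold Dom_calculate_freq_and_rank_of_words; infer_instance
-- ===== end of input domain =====

-- B replaces A's element-wise loop (carried rank + look-back at the previous freq) with a two-phase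
-- computation: build freq_list once, then assign ranks per run of consecutive equal frequencies
-- (objective: alternative decomposition, same cost).

-- ===== PORT A =====
-- the for-loop of A; Option state: none = the iteration raised (IndexError / KeyError)
def pvALoop (word_rank_list : List String) (wcd : PySem.Dict String Int)
    (n i : Nat) (freq_list rank_list : List Int) (rank : Int) : Option (List Int × List Int) :=
  if _h : i < n then
    match PySem.List.pyGet? word_rank_list (i : Int) with
    | none => none          -- IndexError: word_rank_list[i]
    | some word =>
      match wcd.get? word with
      | none => none        -- KeyError: word_count_dict[word]
      | some freq =>
        let rank' := if i > 0 ∧ PySem.List.pyGet? freq_list ((i : Int) - 1) = some freq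
                     then rank else (i : Int) + 1
        pvALoop word_rank_list wcd n (i + 1) (freq_list ++ [freq]) (rank_list ++ [rank']) rank'
  else some (freq_list, rank_list)
termination_by n - i
decreasing_by omega

def calculate_freq_and_rank_of_words (word_rank_list : List String) (word_count_dict : List (String × Int)) : List Int × List Int :=
  ((pvALoop word_rank_list (PySem.Dict.mk word_count_dict) (PySem.Dict.mk word_count_dict).size 0 [] [] 1).getD ([], []))

-- ===== PORT B =====
-- the comprehension of Source B: freq_list = [wcd[wrl[i]] for i in range(n)]; none = it raised
def pvBFreqs (word_rank_list : List String) (wcd : PySem.Dict String Int) (i n : Nat) : Option (List Int) :=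
  if _h : i < n then
    match PySem.List.pyGet? word_rank_list (i : Int) with
    | none => none
    | some word =>
      match wcd.get? word with
      | none => none
      | some freq =>
        match pvBFreqs word_rank_list wcd (i + 1) n with
        | none => none
        | some rest => some (freq :: rest)
  else some []
termination_by n - i
decreasing_by omega

-- length of the inner while-scan: how many leading elements equal f
def pvRunLen (f : Int) : List Int → Nat
  | [] => 0
  | g :: rest => if g = f then pvRunLen f rest + 1 else 0

-- the outer while-loop of Source B: one run of equal freqs at a time
def pvBRanks (start : Nat) : List Int → List Int
  | [] => []
  | f :: rest =>
    let k := pvRunLen f rest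
    List.replicate (k + 1) ((start : Int) + 1) ++ pvBRanks (start + k + 1) (rest.drop k)
termination_by fl => fl.length
decreasing_by simp

def calculate_freq_and_rank_of_words_alt (word_rank_list : List String) (word_count_dict : List (String × Int)) : List Int × List Int :=
  match pvBFreqs word_rank_list (PySem.Dict.mk word_count_dict) 0 (PySem.Dict.mk word_count_dict).size with
  | none => ([], [])
  | some fl => (fl, pvBRanks 0 fl)

-- ===== PRECONDITION & SPEC =====
-- Pre_ excludes exactly the inputs on which A raises: an IndexError when word_rank_list is shorter
-- than word_count_dict, or a KeyError when one of its first len(dict) words is not a key of the dict.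
def Pre_calculate_freq_and_rank_of_words (word_rank_list : List String) (word_count_dict : List (String × Int)) : Prop :=
  word_count_dict.length ≤ word_rank_list.length ∧
  ∀ w ∈ word_rank_list.take word_count_dict.length, (PySem.Dict.mk word_count_dict).contains w = true
instance (word_rank_list : List String) (word_count_dict : List (String × Int)) : Decidable (Pre_calculate_freq_and_rank_of_words word_rank_list word_count_dict) := by unfold Pre_calculate_freq_and_rank_of_words; infer_instance

def pvWitness_calculate_freq_and_rank_of_words : List String × (List (String × Int)) :=
  (["the", "a", "cat"], [("a", 2), ("cat", 2), ("the", 5)])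

def Spec_calculate_freq_and_rank_of_words (word_rank_list : List String) (word_count_dict : List (String × Int)) (out : List Int × List Int) : Prop := out = calculate_freq_and_rank_of_words_alt word_rank_list word_count_dict
instance (word_rank_list : List String) (word_count_dict : List (String × Int)) (out : List Int × List Int) : Decidable (Spec_calculate_freq_and_rank_of_words word_rank_list word_count_dict out) := by unfold Spec_calculate_freq_and_rank_of_words; infer_instance

-- ===== CLAIM (what is proved, stated in full; the proofs are below) =====
def Claim_equal_calculate_freq_and_rank_of_words : Prop := ∀ (word_rank_list : List String) (word_count_dict : List (String × Int)), Dom_calculate_freq_and_rank_of_words word_rank_list word_count_dict → Pre_calculate_freq_and_rank_of_words word_rank_list word_count_dict → Spec_calculate_freq_and_rank_of_words word_rank_list word_count_dict (calculate_freq_and_rank_of_words word_rank_list word_count_dict)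

-- ===== LEMMAS AND PROOFS =====

-- A's rank sequence as a function of the freq list alone (proof-side model of A's loop)
def pvARanks (prev : Option Int) (i : Nat) (rank : Int) : List Int → List Int
  | [] => []
  | f :: rest =>
    let r := if i > 0 ∧ prev = some f then rank else (i : Int) + 1
    r :: pvARanks (some f) (i + 1) r rest

lemma pvBFreqs_isSome (wrl : List String) (d : PySem.Dict String Int) (n : Nat)
    (hlen : n ≤ wrl.length) (hkeys : ∀ w ∈ wrl.take n, d.contains w = true) :
    ∀ (k i : Nat), n - i = k → (pvBFreqs wrl d i n).isSome := by
  intro k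
  induction k with
  | zero =>
    intro i hi
    rw [pvBFreqs]
    have : ¬ i < n := by omega
    simp [this]
  | succ k ih =>
    intro i hi
    have hin : i < n := by omega
    have hiw : i < wrl.length := by omega
    have hget : wrl[i]? = some wrl[i] := List.getElem?_eq_getElem hiw
    have hmem : wrl[i] ∈ wrl.take n := by
      have h1 : i < (wrl.take n).length := by simp; omega
      have h2 : (wrl.take n)[i]'h1 = wrl[i]'hiw := by simp [List.getElem_take]
      exact h2 ▸ List.getElem_mem h1
    have hcont := hkeys _ hmem
    rw [PySem.Dict.contains_eq_isSome_get?] at hcont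
    obtain ⟨freq, hfreq⟩ := Option.isSome_iff_exists.mp hcont
    obtain ⟨rest, hrest⟩ := Option.isSome_iff_exists.mp (ih (i + 1) (by omega))
    rw [pvBFreqs]
    simp [hin, PySem.List.pyGet?_natCast, hget, hfreq, hrest]

lemma pvALoop_eq (wrl : List String) (d : PySem.Dict String Int) (n : Nat) :
    ∀ (F : List Int) (i : Nat) (fl rl : List Int) (rank : Int),
      pvBFreqs wrl d i n = some F → fl.length = i →
      pvALoop wrl d n i fl rl rank = some (fl ++ F, rl ++ pvARanks fl.getLast? i rank F) := by
  intro F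
  induction F with
  | nil =>
    intro i fl rl rank hF hlen
    rw [pvBFreqs] at hF
    by_cases hin : i < n
    · simp only [hin, dif_pos] at hF
      cases hw : PySem.List.pyGet? wrl (i : Int) with
      | none => simp only [hw] at hF; exact absurd hF (by simp)
      | some word =>
        simp only [hw] at hF
        cases hf : d.get? word with
        | none => simp only [hf] at hF; exact absurd hF (by simp)
        | some freq =>
          simp only [hf] at hF
          cases hr : pvBFreqs wrl d (i + 1) n with
          | none => simp only [hr] at hF; exact absurd hF (by simp)
          | some rest => simp only [hr] at hF; simp at hF
    · rw [pvALoop]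
      simp [hin, pvARanks]
  | cons f F' ih =>
    intro i fl rl rank hF hlen
    rw [pvBFreqs] at hF
    by_cases hin : i < n
    swap
    · simp [hin] at hF
    simp only [hin, dif_pos] at hF
    cases hw : PySem.List.pyGet? wrl (i : Int) with
    | none => simp only [hw] at hF; exact absurd hF (by simp)
    | some word =>
      simp only [hw] at hF
      cases hf : d.get? word with
      | none => simp only [hf] at hF; exact absurd hF (by simp)
      | some freq =>
        simp only [hf] at hF
        cases hr : pvBFreqs wrl d (i + 1) n with
        | none => simp only [hr] at hF; exact absurd hF (by simp)
        | some rest =>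
          simp only [hr] at hF
          rw [Option.some_inj] at hF
          injection hF with hfe hre
          rw [hfe] at hf
          subst hre
          -- unfold one step of pvALoop
          rw [pvALoop]
          simp only [hin, dif_pos, hw, hf]
          -- the look-back condition equals the getLast? condition
          have hcond : (i > 0 ∧ PySem.List.pyGet? fl ((i : Int) - 1) = some f)
                     ↔ (i > 0 ∧ fl.getLast? = some f) := by
            constructor
            · rintro ⟨hi0, hpg⟩
              refine ⟨hi0, ?_⟩
              have hcast : (i : Int) - 1 = ((i - 1 : Nat) : Int) := by omega
              rw [hcast, PySem.List.pyGet?_natCast] at hpg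
              rw [List.getLast?_eq_getElem?, hlen]
              exact hpg
            · rintro ⟨hi0, hpg⟩
              refine ⟨hi0, ?_⟩
              have hcast : (i : Int) - 1 = ((i - 1 : Nat) : Int) := by omega
              rw [hcast, PySem.List.pyGet?_natCast]
              rw [List.getLast?_eq_getElem?, hlen] at hpg
              exact hpg
          set r : Int := if i > 0 ∧ PySem.List.pyGet? fl ((i : Int) - 1) = some f then rank else (i : Int) + 1 with hrdef
          have hstep := ih (i + 1) (fl ++ [f]) (rl ++ [r]) r hr (by simp [hlen])
          rw [hstep]
          have hlast : (fl ++ [f]).getLast? = some f := by simp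
          rw [hlast]
          have hr2 : r = if i > 0 ∧ fl.getLast? = some f then rank else (i : Int) + 1 := by
            rw [hrdef]; by_cases h : i > 0 ∧ fl.getLast? = some f
            · rw [if_pos (hcond.mpr h), if_pos h]
            · rw [if_neg (fun hc => h (hcond.mp hc)), if_neg h]
          simp only [pvARanks]
          rw [← hr2]
          simp

lemma pvRunLen_drop_head (f : Int) :
    ∀ (rest : List Int) (g : Int), (rest.drop (pvRunLen f rest)).head? = some g → g ≠ f := by
  intro rest
  induction rest with
  | nil => intro g h; simp at h
  | cons x r ih =>
    intro g h
    by_cases hx : x = f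
    · have hk : pvRunLen f (x :: r) = pvRunLen f r + 1 := by rw [pvRunLen]; simp [hx]
      rw [hk, List.drop_succ_cons] at h
      exact ih g h
    · have hk : pvRunLen f (x :: r) = 0 := by rw [pvRunLen]; simp [hx]
      rw [hk, List.drop_zero, List.head?_cons, Option.some_inj] at h
      rw [← h]; exact hx

lemma pvARanks_run (f : Int) :
    ∀ (rest : List Int) (j : Nat) (r : Int), 0 < j →
      pvARanks (some f) j r rest =
        List.replicate (pvRunLen f rest) r ++
          pvARanks (some f) (j + pvRunLen f rest) r (rest.drop (pvRunLen f rest)) := by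
  intro rest
  induction rest with
  | nil => intro j r _; simp [pvRunLen]
  | cons g rest' ih =>
    intro j r hj
    by_cases hg : g = f
    · subst hg
      simp only [pvARanks]
      simp only [and_true, gt_iff_lt, hj, if_true]
      rw [ih (j + 1) r (by omega)]
      have hk : pvRunLen g (g :: rest') = pvRunLen g rest' + 1 := by rw [pvRunLen]; simp
      rw [hk, List.drop_succ_cons, List.replicate_succ, List.cons_append]
      have : j + 1 + pvRunLen g rest' = j + (pvRunLen g rest' + 1) := by omega
      rw [this]
    · have hk : pvRunLen f (g :: rest') = 0 := by rw [pvRunLen]; simp [hg]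
      rw [hk]
      simp

lemma pvARanks_eq_pvBRanks :
    ∀ (m : Nat) (F : List Int), F.length ≤ m →
      ∀ (j : Nat) (prev : Option Int) (r : Int),
        (∀ f, F.head? = some f → j = 0 ∨ prev ≠ some f) →
        pvARanks prev j r F = pvBRanks j F := by
  intro m
  induction m with
  | zero =>
    intro F hF j prev r _
    have : F = [] := List.eq_nil_of_length_eq_zero (by omega)
    subst this; simp [pvARanks, pvBRanks]
  | succ m ih =>
    intro F hF j prev r hcond
    cases F with
    | nil => simp [pvARanks, pvBRanks]
    | cons f rest =>
      have hne : ¬ (j > 0 ∧ prev = some f) := by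
        rcases hcond f (by simp) with h | h
        · omega
        · rintro ⟨_, hp⟩; exact h hp
      rw [pvARanks]
      simp only [hne, if_false]
      rw [pvARanks_run f rest (j + 1) ((j : Int) + 1) (by omega)]
      set k := pvRunLen f rest with hk
      have hih : pvARanks (some f) (j + 1 + k) ((j : Int) + 1) (rest.drop k) = pvBRanks (j + 1 + k) (rest.drop k) := by
        apply ih _ (by simp at hF ⊢; omega)
        intro g hg
        right
        intro hc
        have := pvRunLen_drop_head f rest g hg
        simp at hc
        exact this hc.symm
      rw [hih]
      rw [pvBRanks]
      simp only [← hk]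
      rw [List.replicate_succ]
      simp only [List.cons_append]
      have : j + 1 + k = j + k + 1 := by omega
      rw [this]

-- ===== VERDICT (by name: the statement is the Claim_ definition above) =====
theorem calculate_freq_and_rank_of_words_spec : Claim_equal_calculate_freq_and_rank_of_words := by
  intro wrl wcd _dom hpre
  unfold Spec_calculate_freq_and_rank_of_words
  obtain ⟨hlen, hkeys⟩ := hpre
  have hsize : (PySem.Dict.mk wcd).size = wcd.length := rfl
  have hsome := pvBFreqs_isSome wrl (PySem.Dict.mk wcd) (PySem.Dict.mk wcd).size
    (by rw [hsize]; exact hlen) (by rw [hsize]; exact hkeys) ((PySem.Dict.mk wcd).size) 0 (by omega)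
  obtain ⟨F, hF⟩ := Option.isSome_iff_exists.mp hsome
  unfold calculate_freq_and_rank_of_words calculate_freq_and_rank_of_words_alt
  rw [hF]
  rw [pvALoop_eq wrl (PySem.Dict.mk wcd) (PySem.Dict.mk wcd).size F 0 [] [] 1 hF rfl]
  simp only [List.nil_append, Option.getD_some]
  rw [pvARanks_eq_pvBRanks F.length F (le_refl _) 0 ([] : List Int).getLast? 1
    (fun f _ => Or.inl rfl)]
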